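-- pv_equiv track=rewrite | github.com/pierrot-lc/crypto_steg | crypto/DES/DES.py | perm_circ
-- ===== SOURCE A (Python) =====
-- def perm_circ(tab, pas):
--     """Décale tout les élément d'un tableau par le pas demandé."""
--     n_tab = list(tab)#Copie le tableau (pour avoir un tableau de la même taille)
--
--     for i in range(len(tab)):
--         try:
--             n_tab[i + pas] = tab[i]
--         except IndexError:
--             n_tab[(i + pas)%len(n_tab)] = tab[i]#Cas de dépassement de l'index, on prends que ce qui dépasse grâce au modulo
--     return n_tab
-- ===== SOURCE B (Python) =====
-- def perm_circ(tab, pas):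
--     """Circular shift by `pas`, as two slices instead of an element-by-element placement loop."""
--     lst = list(tab)
--     n = len(lst)
--     if n == 0:
--         return lst
--     p = pas % n
--     return lst[-p:] + lst[:-p]
-- ===== Notes on version B (the rewrite author's own statement) =====
-- stated objective: simpler
-- what changed: Replaces A's per-element try/except placement loop (with a modulo fallback on IndexError) by a closed-form two-slice concatenation lst[-pas%n:] + lst[:-(pas%n)].
import Mathlib
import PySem

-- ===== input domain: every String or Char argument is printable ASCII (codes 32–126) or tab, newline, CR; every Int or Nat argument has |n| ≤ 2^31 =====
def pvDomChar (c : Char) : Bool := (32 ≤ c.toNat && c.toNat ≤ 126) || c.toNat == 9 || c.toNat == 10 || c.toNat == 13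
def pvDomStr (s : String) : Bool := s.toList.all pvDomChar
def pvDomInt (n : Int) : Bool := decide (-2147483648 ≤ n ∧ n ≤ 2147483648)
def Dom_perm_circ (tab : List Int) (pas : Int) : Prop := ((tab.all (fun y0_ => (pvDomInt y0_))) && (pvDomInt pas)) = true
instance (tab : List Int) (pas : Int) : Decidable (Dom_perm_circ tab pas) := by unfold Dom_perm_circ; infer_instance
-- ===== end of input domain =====

-- B replaces A's per-element try/except placement loop by a two-slice concatenation; objective: simpler.

-- ===== PORT A =====
-- loop body: `try: n_tab[i+pas] = tab[i]  except IndexError: n_tab[(i+pas)%len(n_tab)] = tab[i]`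
-- (pySet? is none exactly where Python raises IndexError, in which case the except branch runs)
def permStepA (tab : List Int) (pas : Int) (n_tab : List Int) (i : Int) : List Int :=
  match PySem.List.pySet? n_tab (i + pas) (PySem.List.pyGetD tab i 0) with
  | some l => l
  | none   => PySem.List.pySetD n_tab (PySem.Int.mod (i + pas) (n_tab.length : Int))
                (PySem.List.pyGetD tab i 0)

def perm_circ (tab : List Int) (pas : Int) : List Int :=
  (PySem.List.pyRange 0 (tab.length : Int) 1).foldl (permStepA tab pas) tab

-- ===== PORT B =====
def perm_circ_alt (tab : List Int) (pas : Int) : List Int :=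
  let lst := tab
  let n : Int := lst.length
  if n = 0 then lst
  else
    let p := PySem.Int.mod pas n
    PySem.List.slice lst (some (-p)) none ++ PySem.List.slice lst none (some (-p))

-- ===== PRECONDITION & SPEC =====
def Spec_perm_circ (tab : List Int) (pas : Int) (out : List Int) : Prop := out = perm_circ_alt tab pas
instance (tab : List Int) (pas : Int) (out : List Int) : Decidable (Spec_perm_circ tab pas out) := by unfold Spec_perm_circ; infer_instance

-- ===== CLAIM (what is proved, stated in full; the proofs are below) =====
def Claim_equal_perm_circ : Prop := ∀ (tab : List Int) (pas : Int), Dom_perm_circ tab pas → Spec_perm_circ tab pas (perm_circ tab pas)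

-- ===== LEMMAS AND PROOFS =====

-- One loop step of A is a single in-range set at the rotated position (i+pas) mod n.
theorem permStepA_eq (tab : List Int) (pas : Int) (acc : List Int) (i : Int)
    (h : 0 < acc.length) :
    permStepA tab pas acc i
      = acc.set ((i + pas) % (acc.length : Int)).toNat (PySem.List.pyGetD tab i 0) := by
  have hn : (0:Int) < (acc.length : Int) := by exact_mod_cast h
  have hne : (acc.length : Int) ≠ 0 := by omega
  unfold permStepA
  rw [PySem.Int.mod_eq_emod_of_pos hn]
  simp only [PySem.List.pySet?, PySem.List.pyIdx?]
  by_cases h0 : 0 ≤ i + pas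
  · by_cases h1 : i + pas < (acc.length : Int)
    · simp [h0, h1, Int.emod_eq_of_lt h0 h1]
    · simp only [h0, if_true, h1, if_false, Option.map_none]
      rw [PySem.List.pySetD_of_nonneg acc _ (Int.emod_nonneg _ hne)]
  · by_cases h2 : -(acc.length : Int) ≤ i + pas
    · simp only [h0, if_false, h2, if_true, Option.map_some]
      congr 1
      have key : (i + pas) % (acc.length : Int) = i + pas + acc.length := by
        have h3 : (i + pas + (acc.length : Int)) % (acc.length : Int) = i + pas + acc.length :=
          Int.emod_eq_of_lt (by omega) (by omega)
        have h4 : (i + pas + (acc.length : Int)) % (acc.length : Int)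
            = (i + pas) % (acc.length : Int) := by
          have h5 := Int.add_mul_emod_self_left (i + pas) (acc.length : Int) 1
          rw [mul_one] at h5
          exact h5
        omega
      omega
    · simp only [h0, if_false, h2, if_false, Option.map_none]
      rw [PySem.List.pySetD_of_nonneg acc _ (Int.emod_nonneg _ hne)]

-- basic bounds of x % n for 0 < n
theorem emod_bounds (x : Int) {n : Int} (hn : 0 < n) : 0 ≤ x % n ∧ x % n < n :=
  ⟨Int.emod_nonneg x (by omega), Int.emod_lt_of_pos x hn⟩

-- the unique setter: for 0 ≤ j < n, j = (m+pas) % n ↔ (j-pas) % n = m (for 0 ≤ m < n)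
theorem setter_iff {pas : Int} {n : Int} {j m : Int}
    (hj : 0 ≤ j) (hj' : j < n) (hm : 0 ≤ m) (hm' : m < n) :
    j = (m + pas) % n ↔ (j - pas) % n = m := by
  have hjj : j % n = j := Int.emod_eq_of_lt hj hj'
  have hmm : m % n = m := Int.emod_eq_of_lt hm hm'
  constructor
  · intro h
    calc (j - pas) % n = ((m + pas) % n - pas) % n := by rw [← h]
    _ = ((m + pas) % n - pas % n) % n := by rw [Int.sub_emod, Int.emod_emod_of_dvd _ dvd_rfl]
    _ = (m + pas - pas) % n := by rw [← Int.sub_emod]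
    _ = m := by rw [show m + pas - pas = m by ring, hmm]
  · intro h
    calc j = j % n := hjj.symm
    _ = (j - pas + pas) % n := by ring_nf
    _ = ((j - pas) % n + pas % n) % n := by rw [Int.add_emod]
    _ = (m % n + pas % n) % n := by rw [h, hmm]
    _ = (m + pas) % n := by rw [← Int.add_emod]

-- characterization of A's fold after the first m iterations
theorem foldA_char (tab : List Int) (pas : Int) (hn : 0 < tab.length) (m : Nat)
    (hm : m ≤ tab.length) :
    ((PySem.List.pyRange 0 (m : Int) 1).foldl (permStepA tab pas) tab).length = tab.length ∧
    ∀ j : Nat, j < tab.length →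
      ((PySem.List.pyRange 0 (m : Int) 1).foldl (permStepA tab pas) tab).getD j 0
        = if (((j:Int) - pas) % (tab.length : Int)).toNat < m
          then tab.getD ((((j:Int) - pas) % (tab.length : Int)).toNat) 0
          else tab.getD j 0 := by
  induction m with
  | zero =>
      rw [Nat.cast_zero, PySem.List.pyRange_one_eq_nil (le_refl 0)]
      refine ⟨rfl, fun j hj => ?_⟩
      simp
  | succ m ih =>
      have hm' : m ≤ tab.length := by omega
      obtain ⟨ihl, ihg⟩ := ih hm'
      have hnI : (0:Int) < (tab.length : Int) := by exact_mod_cast hn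
      have hr : PySem.List.pyRange 0 ((m:Int) + 1) 1
          = PySem.List.pyRange 0 (m:Int) 1 ++ [(m:Int)] :=
        PySem.List.pyRange_one_succ_right (by positivity)
      have hcast : (((m + 1 : Nat)) : Int) = (m : Int) + 1 := by push_cast; ring
      rw [hcast, hr, List.foldl_append]
      set S := (PySem.List.pyRange 0 (m:Int) 1).foldl (permStepA tab pas) tab with hS
      rw [List.foldl_cons, List.foldl_nil,
        permStepA_eq tab pas S (m:Int) (by omega)]
      set q := (((m:Int) + pas) % (S.length : Int)).toNat with hq
      have hqb := emod_bounds ((m:Int) + pas) hnI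
      have hq' : q = (((m:Int) + pas) % (tab.length : Int)).toNat := by rw [hq, ihl]
      have hqlt : q < tab.length := by omega
      constructor
      · rw [List.length_set, ihl]
      · intro j hj
        have hjb := emod_bounds ((j:Int) - pas) hnI
        rw [List.getD_eq_getElem?_getD, List.getElem?_set]
        by_cases hjq : q = j
        · -- j is exactly the position set at step m
          have hsm : (((j:Int) - pas) % (tab.length : Int)) = (m:Int) := by
            have := (setter_iff (pas := pas) (n := (tab.length : Int)) (j := (j:Int)) (m := (m:Int)) (by omega) (by omega)
              (by omega) (by omega)).mp
            apply this
            omega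
          have hcond : (((j:Int) - pas) % (tab.length : Int)).toNat < m + 1 := by omega
          rw [if_pos hjq, if_pos (by rw [ihl]; omega), if_pos hcond]
          have hmn : (((j:Int) - pas) % (tab.length : Int)).toNat = m := by omega
          rw [hmn]
          simp [PySem.List.pyGetD_natCast]
        · -- untouched position: the condition cannot newly hold
          rw [if_neg hjq, ← List.getD_eq_getElem?_getD, ihg j hj]
          have hne : (((j:Int) - pas) % (tab.length : Int)).toNat ≠ m := by
            intro hEq
            apply hjq
            have hsm : (((j:Int) - pas) % (tab.length : Int)) = (m:Int) := by omega
            have := (setter_iff (pas := pas) (n := (tab.length : Int)) (j := (j:Int)) (m := (m:Int)) (by omega)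
              (by omega) (by omega) (by omega)).mpr hsm
            omega
          by_cases hc : (((j:Int) - pas) % (tab.length : Int)).toNat < m
          · rw [if_pos hc, if_pos (by omega)]
          · rw [if_neg hc, if_neg (by omega)]

-- ===== VERDICT (by name: the statement is the Claim_ definition above) =====
theorem perm_circ_spec : Claim_equal_perm_circ := by
  intro tab pas _
  unfold Spec_perm_circ perm_circ perm_circ_alt
  by_cases h0 : tab.length = 0
  · rw [if_pos (by exact_mod_cast h0)]
    rw [show ((tab.length : Int)) = 0 by exact_mod_cast h0,
      PySem.List.pyRange_one_eq_nil (le_refl 0), List.foldl_nil]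
  · have hn : 0 < tab.length := Nat.pos_of_ne_zero h0
    have hnI : (0:Int) < (tab.length : Int) := by exact_mod_cast hn
    rw [if_neg (by omega)]
    show _ = PySem.List.slice tab (some (-(PySem.Int.mod pas (tab.length : Int)))) none
        ++ PySem.List.slice tab none (some (-(PySem.Int.mod pas (tab.length : Int))))
    rw [PySem.Int.mod_eq_emod_of_pos hnI]
    set p : Int := pas % (tab.length : Int) with hp
    have hpmod : p = pas % (tab.length : Int) := hp
    have hpb : 0 ≤ p ∧ p < (tab.length : Int) := by
      rw [hpmod]; exact emod_bounds pas hnI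
    obtain ⟨hA_len, hA_get⟩ := foldA_char tab pas hn tab.length (le_refl _)
    -- rewrite the two slices as drop/take
    have hslice1 : PySem.List.slice tab (some (-p)) none
        = tab.drop (PySem.List.clampIdx tab.length (-p)) :=
      PySem.List.slice_some_none tab (-p)
    have hslice2 : PySem.List.slice tab none (some (-p))
        = tab.take (PySem.List.clampIdx tab.length (-p)) := by
      simp only [PySem.List.slice, PySem.List.clampIdx]
      simp
    rw [hslice1, hslice2]
    set d : Nat := PySem.List.clampIdx tab.length (-p) with hd
    have hdval : (d : Int) = if p = 0 then 0 else (tab.length : Int) - p := by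
      rw [hd]; simp only [PySem.List.clampIdx]
      by_cases hp0 : p = 0
      · simp [hp0]
      · rw [if_pos (by omega), if_neg (by omega), if_neg hp0]
        omega
    have hdle : d ≤ tab.length := by
      by_cases hp0 : p = 0 <;> simp [hp0] at hdval <;> omega
    apply List.ext_getElem
    · rw [hA_len]
      rw [List.length_append, List.length_drop, List.length_take]
      omega
    · intro j h₁ h₂
      have hj : j < tab.length := by rwa [hA_len] at h₁
      have hjb := emod_bounds ((j:Int) - pas) hnI
      have hAg := hA_get j hj
      rw [if_pos (by omega)] at hAg
      have hAj : ((PySem.List.pyRange 0 (tab.length : Int) 1).foldl (permStepA tab pas) tab)[j]'h₁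
          = tab.getD ((((j:Int) - pas) % (tab.length : Int)).toNat) 0 := by
        rw [← hAg, List.getD_eq_getElem?_getD, List.getElem?_eq_getElem h₁]
        rfl
      rw [hAj, List.getElem_append]
      -- key congruence: (j - pas) % n = (j - p) % n  since p = pas % n
      have hmodp : ((j:Int) - pas) % (tab.length : Int) = ((j:Int) - p) % (tab.length : Int) := by
        rw [hpmod, Int.sub_emod ((j:Int)) pas, Int.sub_emod ((j:Int)) (pas % (tab.length : Int)),
          Int.emod_emod_of_dvd _ dvd_rfl]
      by_cases hcase : j < (tab.drop d).length
      · -- j indexes the dropped part: tab[d + j]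
        rw [dif_pos hcase, List.getElem_drop]
        have hjd : j < tab.length - d := by rwa [List.length_drop] at hcase
        have hmv : (((j:Int) - pas) % (tab.length : Int)) = (d:Int) + j := by
          rw [hmodp]
          by_cases hp0 : p = 0
          · rw [if_pos hp0] at hdval
            rw [hp0, sub_zero, Int.emod_eq_of_lt (by omega) (by exact_mod_cast hj)]
            omega
          · rw [if_neg hp0] at hdval
            have hjp : (j:Int) < p := by omega
            have step : ((j:Int) - p + (tab.length : Int)) % (tab.length : Int)
                = ((j:Int) - p) % (tab.length : Int) := by
              have h5 := Int.add_mul_emod_self_left ((j:Int) - p) (tab.length : Int) 1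
              rw [mul_one] at h5
              exact h5
            have hv : ((j:Int) - p + (tab.length : Int)) % (tab.length : Int)
                = (j:Int) - p + (tab.length : Int) := Int.emod_eq_of_lt (by omega) (by omega)
            omega
        have : (((j:Int) - pas) % (tab.length : Int)).toNat = d + j := by omega
        rw [this, List.getD_eq_getElem?_getD, List.getElem?_eq_getElem (by omega)]
        rfl
      · -- j indexes the taken part: tab[j - (n - d)]
        rw [dif_neg hcase, List.getElem_take]
        have hjd : (tab.drop d).length ≤ j := by omega
        rw [List.length_drop] at hjd hcase
        have hp0 : p ≠ 0 := by
          intro hp0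
          rw [if_pos hp0] at hdval
          omega
        rw [if_neg hp0] at hdval
        have hmv : (((j:Int) - pas) % (tab.length : Int)) = (j:Int) - (tab.length - d : Nat) := by
          rw [hmodp]
          have : ((j:Int) - p) % (tab.length : Int) = (j:Int) - p :=
            Int.emod_eq_of_lt (by omega) (by omega)
          omega
        have : (((j:Int) - pas) % (tab.length : Int)).toNat = j - (tab.length - d) := by omega
        rw [this, List.getD_eq_getElem?_getD,
          List.getElem?_eq_getElem (by omega : j - (tab.length - d) < tab.length)]
        simp [List.length_drop]
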